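-- pv_equiv track=rewrite | github.com/mboker/HackerrankProblems | HR_Bit_Manip/TheGreatXOR.py | theGreatXor
-- ===== SOURCE A (Python) =====
-- def theGreatXor(x):
--     values = 0
--     index = 0
--     while x > 0:
--         if not x & 1:
--             values += 2**index
--         x = x >> 1
--         index += 1
--     return values
-- ===== SOURCE B (Python) =====
-- def theGreatXor(x):
--     if x <= 0:
--         return 0
--     return (1 << x.bit_length()) - 1 - x
-- ===== Notes on version B (the rewrite author's own statement) =====
-- stated objective: simpler
-- what changed: Replaces the per-bit while loop with the closed form (1 << x.bit_length()) - 1 - x (the complement of x below its top bit), returning 0 for x <= 0 where the loop never runs.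
import Mathlib
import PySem

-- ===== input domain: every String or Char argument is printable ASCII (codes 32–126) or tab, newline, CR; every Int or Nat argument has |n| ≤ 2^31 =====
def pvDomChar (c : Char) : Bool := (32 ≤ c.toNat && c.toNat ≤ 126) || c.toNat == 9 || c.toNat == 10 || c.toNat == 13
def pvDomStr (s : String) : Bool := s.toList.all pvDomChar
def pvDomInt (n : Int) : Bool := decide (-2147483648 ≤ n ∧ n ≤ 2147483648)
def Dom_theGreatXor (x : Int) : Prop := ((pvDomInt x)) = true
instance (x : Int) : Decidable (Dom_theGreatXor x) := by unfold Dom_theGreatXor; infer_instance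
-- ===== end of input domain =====

-- B replaces A's per-bit while loop by the closed form (1 << x.bit_length()) - 1 - x
-- (returning 0 for x <= 0, where A's loop never runs): simpler, a single arithmetic expression.

-- ===== PORT A =====
-- the while loop of A: state (x, values, index); 2**index is 2 ^ index.toNat (index stays ≥ 0)
def theGreatXorGo (x values index : Int) : Int :=
  if h : 0 < x then
    theGreatXorGo (x >>> (1 : Nat))
      (if PySem.Int.band x 1 = 0 then values + 2 ^ index.toNat else values)
      (index + 1)
  else values
termination_by x.toNat
decreasing_by
  have h2 : x >>> (1 : Nat) = x / 2 := by
    simpa using Int.shiftRight_eq_div_pow x 1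
  rw [h2]; omega

def theGreatXor (x : Int) : Int := theGreatXorGo x 0 0

-- ===== PORT B =====
def theGreatXor_alt (x : Int) : Int :=
  if x ≤ 0 then 0
  else ((1 : Int) <<< PySem.Int.bitLength x) - 1 - x

-- ===== PRECONDITION & SPEC =====
def Spec_theGreatXor (x : Int) (out : Int) : Prop := out = theGreatXor_alt x
instance (x : Int) (out : Int) : Decidable (Spec_theGreatXor x out) := by unfold Spec_theGreatXor; infer_instance

-- ===== CLAIM (what is proved, stated in full; the proofs are below) =====
def Claim_equal_theGreatXor : Prop := ∀ (x : Int), Dom_theGreatXor x → Spec_theGreatXor x (theGreatXor x)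

-- ===== LEMMAS AND PROOFS =====

-- the value A's loop adds from state x onward (closed form)
def gxVal (x : Int) : Int :=
  if 0 < x then 2 ^ PySem.Int.bitLength x - 1 - x else 0

lemma one_shiftLeft_int (k : Nat) : (1 : Int) <<< k = 2 ^ k := by
  rw [Int.shiftLeft_eq]; ring

lemma gxVal_step (x : Int) (hx : 0 < x) :
    gxVal x = (if PySem.Int.band x 1 = 0 then 1 else 0) + 2 * gxVal (x / 2) := by
  have hband : PySem.Int.band x 1 = x % 2 := by
    rw [PySem.Int.band_one, PySem.Int.mod_eq_emod_of_pos (by omega)]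
  have hbl : PySem.Int.bitLength x = PySem.Int.bitLength (x / 2) + 1 := by
    rw [PySem.Int.bitLength_of_pos hx, PySem.Int.floordiv_eq_ediv_of_pos (by omega)]
  have hr : x % 2 = 0 ∨ x % 2 = 1 := by omega
  by_cases hq : 0 < x / 2
  · have : x = 2 * (x / 2) + x % 2 := by omega
    simp only [gxVal, if_pos hx, if_pos hq, hband, hbl, pow_succ]
    rcases hr with h | h <;> simp [h] <;> omega
  · have hx1 : x = 1 := by omega
    subst hx1
    norm_num [gxVal, hband, hbl]

lemma go_eq (n : Nat) : ∀ x v i : Int, x.toNat = n → 0 ≤ i →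
    theGreatXorGo x v i = v + 2 ^ i.toNat * gxVal x := by
  induction n using Nat.strong_induction_on with
  | _ n ih =>
    intro x v i hn hi
    rw [theGreatXorGo]
    by_cases hx : 0 < x
    · have h2 : x >>> (1 : Nat) = x / 2 := by
        simpa using Int.shiftRight_eq_div_pow x 1
      have hlt : (x / 2).toNat < n := by omega
      rw [dif_pos hx, h2,
        ih (x / 2).toNat hlt (x / 2) _ (i + 1) rfl (by omega)]
      have hi1 : (i + 1).toNat = i.toNat + 1 := by omega
      rw [gxVal_step x hx, hi1, pow_succ]
      by_cases hb : PySem.Int.band x 1 = 0 <;> simp [hb] <;> ring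
    · rw [dif_neg hx]
      simp [gxVal, hx]

-- ===== VERDICT (by name: the statement is the Claim_ definition above) =====
theorem theGreatXor_spec : Claim_equal_theGreatXor := by
  intro x _
  show theGreatXor x = theGreatXor_alt x
  rw [theGreatXor, go_eq x.toNat x 0 0 rfl (le_refl 0)]
  simp only [theGreatXor_alt, one_shiftLeft_int, gxVal]
  by_cases hx : 0 < x
  · rw [if_pos hx, if_neg (by omega)]
    simp [Int.toNat]
  · rw [if_neg hx, if_pos (by omega)]; simp
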